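-- pv_equiv track=rewrite | github.com/tae0y/brain-beaver | src/Python.FastApi/pipeline/steps/summarize.py | _has_repetition
-- ===== SOURCE A (Python) =====
-- def _has_repetition(text: str) -> bool:
--     """반복 내용 검출"""
--     sentences = [s.strip() for s in text.split('.') if s.strip()]
--     if len(sentences) < 2:
--         return False
--
--     # 문장 유사도 체크 (간단한 방식)
--     for i, sent1 in enumerate(sentences):
--         for sent2 in sentences[i+1:]:
--             if len(sent1) > 10 and len(sent2) > 10:
--                 similarity = len(set(sent1.split()) & set(sent2.split())) / max(len(sent1.split()), len(sent2.split()))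
--                 if similarity > 0.7:
--                     return True
--     return False
-- ===== SOURCE B (Python) =====
-- def _has_repetition(text: str) -> bool:
--     sentences = [s.strip() for s in text.split('.') if s.strip()]
--     if len(sentences) < 2:
--         return False
--     words = [s.split() for s in sentences]
--     # inverted index: word -> ordered list of sentence indices containing it
--     index = {}
--     for i, ws in enumerate(words):
--         for w in dict.fromkeys(ws):
--             index.setdefault(w, []).append(i)
--     # only pairs sharing at least one word can have nonzero similarity
--     for idxs in index.values():
--         for a in range(len(idxs)):
--             for b in range(a + 1, len(idxs)):
--                 i, j = idxs[a], idxs[b]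
--                 if len(sentences[i]) > 10 and len(sentences[j]) > 10:
--                     inter = len(set(words[i]) & set(words[j]))
--                     if inter / max(len(words[i]), len(words[j])) > 0.7:
--                         return True
--     return False
-- ===== Notes on version B (the rewrite author's own statement) =====
-- stated objective: alternative
-- what changed: Replaces the all-pairs nested scan (which re-splits each sentence inside the inner loop) by an inverted index word -> sentence indices built in one pass over pre-split sentences; only pairs of sentences sharing at least one word are ever compared, since pairs with no common word have similarity 0.
import Mathlib
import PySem

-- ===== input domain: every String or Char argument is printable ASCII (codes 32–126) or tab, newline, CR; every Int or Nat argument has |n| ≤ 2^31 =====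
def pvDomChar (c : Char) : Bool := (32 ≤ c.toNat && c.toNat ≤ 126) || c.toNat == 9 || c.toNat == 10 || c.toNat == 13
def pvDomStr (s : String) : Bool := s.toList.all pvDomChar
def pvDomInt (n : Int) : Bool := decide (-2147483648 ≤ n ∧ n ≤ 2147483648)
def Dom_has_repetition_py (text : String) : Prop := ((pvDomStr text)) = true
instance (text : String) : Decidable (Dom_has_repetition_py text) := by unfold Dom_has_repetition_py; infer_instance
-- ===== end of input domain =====

-- B replaces A's all-pairs nested scan by an inverted index (word -> sentence indices) over
-- pre-split sentences, so only sentence pairs sharing at least one word are ever compared.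


-- ===== PORT A =====
-- shared by both Pythons: sentences = [s.strip() for s in text.split('.') if s.strip()]
def pvSentences (text : String) : List String :=
  (((PySem.Str.split? text ".").getD []).map PySem.Str.strip).filter (fun s => !(s == ""))

-- len(set(w1) & set(w2)) / max(len(w1), len(w2)) > 0.7, cross-multiplied exactly
def pvSim (w1 w2 : List String) : Bool :=
  10 * PySem.Set.len (PySem.Set.inter (PySem.Set.ofList w1) (PySem.Set.ofList w2)) >
    7 * (max w1.length w2.length : Int)

-- the body of A's inner loop: guard, then similarity test (A re-splits the sentences here)
def pvCondA (sent1 sent2 : String) : Bool :=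
  if PySem.Str.len sent1 > 10 && PySem.Str.len sent2 > 10 then
    pvSim (PySem.Str.split₀ sent1) (PySem.Str.split₀ sent2)
  else false

-- for sent2 in sentences[i+1:]
def pvInnerA (sent1 : String) : List String → Bool
  | [] => false
  | sent2 :: rest => if pvCondA sent1 sent2 then true else pvInnerA sent1 rest

-- for i, sent1 in enumerate(sentences)
def pvOuterA : List String → Bool
  | [] => false
  | sent1 :: rest => if pvInnerA sent1 rest then true else pvOuterA rest

def has_repetition_py (text : String) : Bool :=
  let sentences := pvSentences text
  if sentences.length < 2 then false else pvOuterA sentences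

-- ===== PORT B =====
-- words = [s.split() for s in sentences]
def pvWordsB (sentences : List String) : List (List String) := sentences.map PySem.Str.split₀

-- for i, ws in enumerate(words): for w in dict.fromkeys(ws): index.setdefault(w, []).append(i)
def pvBuildIndex : List (List String) → Nat → PySem.Dict String (List Nat) → PySem.Dict String (List Nat)
  | [], _, d => d
  | ws :: rest, i, d =>
      pvBuildIndex rest (i + 1)
        ((PySem.List.dedup ws).foldl (fun d w => d.insert w (d.getD w [] ++ [i])) d)

-- guard on sentences[i], sentences[j]; similarity from the precomputed words lists
def pvCheckB (S : List String) (W : List (List String)) (i j : Nat) : Bool :=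
  if PySem.Str.len (S.getD i "") > 10 && PySem.Str.len (S.getD j "") > 10 then
    pvSim (W.getD i []) (W.getD j [])
  else false

-- for b in range(a+1, len(idxs))
def pvScanFrom (S : List String) (W : List (List String)) (i : Nat) : List Nat → Bool
  | [] => false
  | j :: rest => if pvCheckB S W i j then true else pvScanFrom S W i rest

-- for a in range(len(idxs))
def pvScanIdxs (S : List String) (W : List (List String)) : List Nat → Bool
  | [] => false
  | i :: rest => if pvScanFrom S W i rest then true else pvScanIdxs S W rest

-- for idxs in index.values()
def pvGroups (S : List String) (W : List (List String)) : List (List Nat) → Bool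
  | [] => false
  | idxs :: rest => if pvScanIdxs S W idxs then true else pvGroups S W rest

def has_repetition_py_alt (text : String) : Bool :=
  let sentences := pvSentences text
  if sentences.length < 2 then false
  else
    let words := pvWordsB sentences
    let index := pvBuildIndex words 0 PySem.Dict.empty
    pvGroups sentences words index.values

-- ===== PRECONDITION & SPEC =====
def Spec_has_repetition_py (text : String) (out : Bool) : Prop := out = has_repetition_py_alt text
instance (text : String) (out : Bool) : Decidable (Spec_has_repetition_py text out) := by unfold Spec_has_repetition_py; infer_instance

-- ===== CLAIM (what is proved, stated in full; the proofs are below) =====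
def Claim_equal_has_repetition_py : Prop := ∀ (text : String), Dom_has_repetition_py text → Spec_has_repetition_py text (has_repetition_py text)

-- ===== LEMMAS AND PROOFS =====

-- the indices the inverted index stores for word w, starting at offset k
def pvIdxSpec (w : String) : List (List String) → Nat → List Nat
  | [], _ => []
  | ws :: rest, k => (if w ∈ ws then [k] else []) ++ pvIdxSpec w rest (k + 1)

theorem pvInnerA_false (s1 : String) (l : List String) :
    pvInnerA s1 l = false ↔ ∀ s2 ∈ l, pvCondA s1 s2 = false := by
  induction l with
  | nil => simp [pvInnerA]
  | cons a l ih =>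
    simp only [pvInnerA]
    by_cases h : pvCondA s1 a <;> simp [h, ih]

theorem pvOuterA_false (l : List String) :
    pvOuterA l = false ↔ l.Pairwise (fun a b => pvCondA a b = false) := by
  induction l with
  | nil => simp [pvOuterA]
  | cons a l ih =>
    simp only [pvOuterA, List.pairwise_cons]
    cases hin : pvInnerA a l
    · rw [if_neg (by simp), ih]
      constructor
      · intro hp; exact ⟨(pvInnerA_false a l).mp hin, hp⟩
      · rintro ⟨-, hp⟩; exact hp
    · rw [if_pos (by simp)]
      constructor
      · intro hc; exact absurd hc (by simp)
      · rintro ⟨hall, -⟩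
        exact absurd ((pvInnerA_false a l).mpr hall) (by simp [hin])

theorem pvScanFrom_false (S : List String) (W : List (List String)) (i : Nat) (l : List Nat) :
    pvScanFrom S W i l = false ↔ ∀ j ∈ l, pvCheckB S W i j = false := by
  induction l with
  | nil => simp [pvScanFrom]
  | cons a l ih =>
    simp only [pvScanFrom]
    by_cases h : pvCheckB S W i a <;> simp [h, ih]

theorem pvScanIdxs_false (S : List String) (W : List (List String)) (l : List Nat) :
    pvScanIdxs S W l = false ↔ l.Pairwise (fun i j => pvCheckB S W i j = false) := by
  induction l with
  | nil => simp [pvScanIdxs]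
  | cons a l ih =>
    simp only [pvScanIdxs, List.pairwise_cons]
    cases hin : pvScanFrom S W a l
    · rw [if_neg (by simp), ih]
      constructor
      · intro hp; exact ⟨(pvScanFrom_false S W a l).mp hin, hp⟩
      · rintro ⟨-, hp⟩; exact hp
    · rw [if_pos (by simp)]
      constructor
      · intro hc; exact absurd hc (by simp)
      · rintro ⟨hall, -⟩
        exact absurd ((pvScanFrom_false S W a l).mpr hall) (by simp [hin])

theorem pvGroups_false (S : List String) (W : List (List String)) (gs : List (List Nat)) :
    pvGroups S W gs = false ↔ ∀ idxs ∈ gs, pvScanIdxs S W idxs = false := by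
  induction gs with
  | nil => simp [pvGroups]
  | cons a gs ih =>
    simp only [pvGroups]
    by_cases h : pvScanIdxs S W a <;> simp [h, ih]

-- inner fold over the (distinct) words of one sentence
theorem pvFold_getD_of_not_mem (i : Nat) (w : String) (l : List String) (d : PySem.Dict String (List Nat))
    (h : w ∉ l) :
    (l.foldl (fun d w' => d.insert w' (d.getD w' [] ++ [i])) d).getD w [] = d.getD w [] := by
  induction l generalizing d with
  | nil => rfl
  | cons a l ih =>
    simp only [List.foldl_cons]
    have hne : w ≠ a := fun he => h (by simp [he])
    rw [ih _ (fun hm => h (List.mem_cons_of_mem a hm)),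
        PySem.Dict.getD_insert_of_ne _ _ _ hne]

theorem pvFold_getD (i : Nat) (w : String) (l : List String) (d : PySem.Dict String (List Nat))
    (hnd : l.Nodup) :
    (l.foldl (fun d w' => d.insert w' (d.getD w' [] ++ [i])) d).getD w [] =
      d.getD w [] ++ (if w ∈ l then [i] else []) := by
  induction l generalizing d with
  | nil => simp
  | cons a l ih =>
    simp only [List.foldl_cons]
    rcases List.nodup_cons.mp hnd with ⟨ha, hl⟩
    by_cases hw : w = a
    · subst hw
      rw [pvFold_getD_of_not_mem i w l _ ha, PySem.Dict.getD_insert_self]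
      simp
    · rw [ih _ hl, PySem.Dict.getD_insert_of_ne _ _ _ hw]
      simp [hw]

theorem pvBuildIndex_getD (W : List (List String)) (k : Nat) (d : PySem.Dict String (List Nat)) (w : String) :
    (pvBuildIndex W k d).getD w [] = d.getD w [] ++ pvIdxSpec w W k := by
  induction W generalizing k d with
  | nil => simp [pvBuildIndex, pvIdxSpec]
  | cons ws rest ih =>
    simp only [pvBuildIndex, pvIdxSpec]
    rw [ih, pvFold_getD _ _ _ _ (PySem.List.nodup_dedup ws)]
    simp [List.append_assoc]

theorem pvBuildIndex_keys_nodup (W : List (List String)) (k : Nat) (d : PySem.Dict String (List Nat))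
    (h : d.keys.Nodup) : (pvBuildIndex W k d).keys.Nodup := by
  induction W generalizing k d with
  | nil => exact h
  | cons ws rest ih =>
    exact ih _ _ (PySem.Dict.nodup_keys_foldl_insert _ _ _ h)

theorem pvIdxSpec_mem (w : String) (W : List (List String)) (k : Nat) (i : Nat) :
    i ∈ pvIdxSpec w W k ↔ ∃ t, t < W.length ∧ i = k + t ∧ w ∈ W.getD t [] := by
  induction W generalizing k with
  | nil => simp [pvIdxSpec]
  | cons ws rest ih =>
    simp only [pvIdxSpec, List.mem_append, ih]
    constructor
    · rintro (h | ⟨t, ht, rfl, hw⟩)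
      · refine ⟨0, by simp, ?_, ?_⟩ <;> by_cases hm : w ∈ ws <;> simp_all
      · exact ⟨t + 1, by simpa using ht, by omega, by simpa using hw⟩
    · rintro ⟨t, ht, rfl, hw⟩
      cases t with
      | zero => left; simp_all
      | succ t => right; exact ⟨t, by simpa using ht, by omega, by simpa using hw⟩

theorem pvIdxSpec_sorted (w : String) (W : List (List String)) (k : Nat) :
    (pvIdxSpec w W k).Pairwise (· < ·) := by
  induction W generalizing k with
  | nil => simp [pvIdxSpec]
  | cons ws rest ih =>
    simp only [pvIdxSpec]
    refine List.pairwise_append.mpr ⟨?_, ih (k + 1), ?_⟩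
    · by_cases hm : w ∈ ws <;> simp [hm]
    · intro a ha b hb
      have ha' : a = k := by by_cases hm : w ∈ ws <;> simp_all
      have := (pvIdxSpec_mem w rest (k + 1) b).mp hb
      omega

-- in a strictly increasing list, pairwise-P follows for any two members in order
theorem pvPairwise_of_mem (P : Nat → Nat → Prop) {l : List Nat}
    (hlt : l.Pairwise (· < ·)) (hP : l.Pairwise P) {i j : Nat}
    (hi : i ∈ l) (hj : j ∈ l) (hij : i < j) : P i j := by
  induction l with
  | nil => simp at hi
  | cons a l ih =>
    rcases List.pairwise_cons.mp hlt with ⟨hlt1, hlt2⟩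
    rcases List.pairwise_cons.mp hP with ⟨hP1, hP2⟩
    rcases List.mem_cons.mp hi with rfl | hi'
    · rcases List.mem_cons.mp hj with rfl | hj'
      · omega
      · exact hP1 j hj'
    · rcases List.mem_cons.mp hj with rfl | hj'
      · exact absurd (hlt1 i hi') (by omega)
      · exact ih hlt2 hP2 hi' hj'

-- values of the built index are exactly the pvIdxSpec lists of its keys
theorem pvIndex_values (W : List (List String)) :
    (pvBuildIndex W 0 PySem.Dict.empty).values =
      (pvBuildIndex W 0 PySem.Dict.empty).keys.map (fun w => pvIdxSpec w W 0) := by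
  have hnd : (pvBuildIndex W 0 PySem.Dict.empty).keys.Nodup :=
    pvBuildIndex_keys_nodup W 0 _ (by simp [PySem.Dict.empty, PySem.Dict.keys])
  have h := PySem.Dict.items_eq_map_keys (pvBuildIndex W 0 PySem.Dict.empty) hnd ([] : List Nat)
  have hv : (pvBuildIndex W 0 PySem.Dict.empty).values =
      (pvBuildIndex W 0 PySem.Dict.empty).items.map (·.2) := rfl
  rw [hv, h, List.map_map]
  apply List.map_congr_left
  intro w _
  simp only [Function.comp]
  rw [pvBuildIndex_getD]
  rfl

-- pvCheckB agrees with pvCondA at in-range indices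
theorem pvWordsB_getD (S : List String) (i : Nat) (hi : i < S.length) :
    (pvWordsB S).getD i [] = PySem.Str.split₀ (S.getD i "") := by
  rw [List.getD_eq_getElem _ _ (by simpa [pvWordsB] using hi),
      List.getD_eq_getElem _ _ hi]
  simp [pvWordsB]

theorem pvCheckB_eq_condA (S : List String) (i j : Nat) (hi : i < S.length) (hj : j < S.length) :
    pvCheckB S (pvWordsB S) i j = pvCondA (S.getD i "") (S.getD j "") := by
  unfold pvCheckB pvCondA
  rw [pvWordsB_getD S i hi, pvWordsB_getD S j hj]

-- a true similarity needs a shared word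
theorem pvSim_shared (w1 w2 : List String) (h : pvSim w1 w2 = true) :
    ∃ w, w ∈ w1 ∧ w ∈ w2 := by
  unfold pvSim at h
  rcases hn : PySem.Set.inter (PySem.Set.ofList w1) (PySem.Set.ofList w2) with _ | ⟨w, rest⟩
  · rw [hn] at h
    simp [PySem.Set.len] at h
    omega
  · refine ⟨w, ?_⟩
    have : w ∈ PySem.Set.inter (PySem.Set.ofList w1) (PySem.Set.ofList w2) := by rw [hn]; simp
    rcases (PySem.Set.mem_inter _ _ _).mp this with ⟨h1, h2⟩
    exact ⟨(PySem.Set.mem_ofList _ _).mp h1, (PySem.Set.mem_ofList _ _).mp h2⟩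

-- B's scan is false iff every in-range ordered pair fails pvCondA
theorem pvB_false_iff (S : List String) :
    pvGroups S (pvWordsB S) (pvBuildIndex (pvWordsB S) 0 PySem.Dict.empty).values = false ↔
      ∀ i j, i < j → j < S.length → pvCondA (S.getD i "") (S.getD j "") = false := by
  rw [pvGroups_false, pvIndex_values]
  constructor
  · intro h i j hij hj
    by_contra hc
    have hcond : pvCondA (S.getD i "") (S.getD j "") = true := by
      cases hcv : pvCondA (S.getD i "") (S.getD j "") <;> simp_all
    -- extract a shared word
    have hsim : pvSim (PySem.Str.split₀ (S.getD i "")) (PySem.Str.split₀ (S.getD j "")) = true := by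
      unfold pvCondA at hcond
      split at hcond <;> simp_all
    rcases pvSim_shared _ _ hsim with ⟨w, hw1, hw2⟩
    have hi : i < S.length := lt_trans hij hj
    have hwi : w ∈ (pvWordsB S).getD i [] := by
      rw [pvWordsB_getD S i hi]; exact hw1
    have hwj : w ∈ (pvWordsB S).getD j [] := by
      rw [pvWordsB_getD S j hj]; exact hw2
    have hiI : i ∈ pvIdxSpec w (pvWordsB S) 0 := by
      rw [pvIdxSpec_mem]
      exact ⟨i, by simpa [pvWordsB] using hi, by omega, hwi⟩
    have hjI : j ∈ pvIdxSpec w (pvWordsB S) 0 := by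
      rw [pvIdxSpec_mem]
      exact ⟨j, by simpa [pvWordsB] using hj, by omega, hwj⟩
    -- w is a key of the index
    have hkey : w ∈ (pvBuildIndex (pvWordsB S) 0 PySem.Dict.empty).keys := by
      by_contra hk
      have hcw : (pvBuildIndex (pvWordsB S) 0 PySem.Dict.empty).contains w = false := by
        cases hcc : (pvBuildIndex (pvWordsB S) 0 PySem.Dict.empty).contains w
        · rfl
        · exact absurd ((PySem.Dict.contains_iff_mem_keys _ _).mp hcc) hk
      have := PySem.Dict.getD_of_not_contains (pvBuildIndex (pvWordsB S) 0 PySem.Dict.empty)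
        ([] : List Nat) hcw
      rw [pvBuildIndex_getD] at this
      simp [PySem.Dict.empty] at this
      rw [this.2] at hiI
      simp at hiI
    have hscan := h (pvIdxSpec w (pvWordsB S) 0) (List.mem_map_of_mem hkey)
    rw [pvScanIdxs_false] at hscan
    have hfalse : pvCheckB S (pvWordsB S) i j = false :=
      pvPairwise_of_mem (fun i j => pvCheckB S (pvWordsB S) i j = false)
        (pvIdxSpec_sorted w (pvWordsB S) 0) hscan hiI hjI hij
    rw [pvCheckB_eq_condA S i j hi hj] at hfalse
    exact hc hfalse
  · intro h idxs hidxs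
    rcases List.mem_map.mp hidxs with ⟨w, _, rfl⟩
    rw [pvScanIdxs_false]
    have hsorted := pvIdxSpec_sorted w (pvWordsB S) 0
    rw [List.pairwise_iff_getElem] at hsorted ⊢
    intro a b ha hb hab
    have hlt := hsorted a b ha hb hab
    have hiM : (pvIdxSpec w (pvWordsB S) 0)[a] ∈ pvIdxSpec w (pvWordsB S) 0 := List.getElem_mem _
    have hjM : (pvIdxSpec w (pvWordsB S) 0)[b] ∈ pvIdxSpec w (pvWordsB S) 0 := List.getElem_mem _
    rcases (pvIdxSpec_mem _ _ _ _).mp hiM with ⟨t1, ht1, he1, _⟩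
    rcases (pvIdxSpec_mem _ _ _ _).mp hjM with ⟨t2, ht2, he2, _⟩
    have hjlen : (pvIdxSpec w (pvWordsB S) 0)[b] < S.length := by
      simp [pvWordsB] at ht2; omega
    have hilen : (pvIdxSpec w (pvWordsB S) 0)[a] < S.length := by
      simp [pvWordsB] at ht1; omega
    rw [pvCheckB_eq_condA S _ _ hilen hjlen]
    exact h _ _ hlt hjlen

-- A's scan is false under the same condition
theorem pvA_false_iff (S : List String) :
    pvOuterA S = false ↔
      ∀ i j, i < j → j < S.length → pvCondA (S.getD i "") (S.getD j "") = false := by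
  rw [pvOuterA_false, List.pairwise_iff_getElem]
  constructor
  · intro h i j hij hj
    have hi : i < S.length := lt_trans hij hj
    have := h i j hi hj hij
    simpa [List.getD_eq_getElem?_getD, List.getElem?_eq_getElem, hi, hj] using this
  · intro h i j hi hj hij
    have := h i j hij hj
    simpa [List.getD_eq_getElem?_getD, List.getElem?_eq_getElem, hi, hj] using this

-- ===== VERDICT (by name: the statement is the Claim_ definition above) =====
theorem has_repetition_py_spec : Claim_equal_has_repetition_py := by
  intro text _
  unfold Spec_has_repetition_py
  show (if (pvSentences text).length < 2 then false else pvOuterA (pvSentences text)) =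
    (if (pvSentences text).length < 2 then false
     else pvGroups (pvSentences text) (pvWordsB (pvSentences text))
       (pvBuildIndex (pvWordsB (pvSentences text)) 0 PySem.Dict.empty).values)
  by_cases hlen : (pvSentences text).length < 2
  · simp [hlen]
  · simp only [hlen, if_false]
    have hA := pvA_false_iff (pvSentences text)
    have hB := pvB_false_iff (pvSentences text)
    cases ha : pvOuterA (pvSentences text) <;>
      cases hb : pvGroups (pvSentences text) (pvWordsB (pvSentences text))
        (pvBuildIndex (pvWordsB (pvSentences text)) 0 PySem.Dict.empty).values
    · rfl
    · exact absurd (hB.mpr (hA.mp ha)) (by simp [hb])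
    · exact absurd (hA.mpr (hB.mp hb)) (by simp [ha])
    · rfl
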